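-- pv_equiv track=rewrite | github.com/sylacour/FIRST-PL-pipeline | runPL_calibrateNeon.py | let_go_of_some_peaks
-- ===== SOURCE A (Python) =====
-- from itertools import combinations
--
-- def let_go_of_some_peaks(wavelength_list, how_many_peaks_to_ignore):
--     '''
--     For n peaks to ignore, returns a list containing all new possible combinations of wavelenght list.
--     '''
--     if how_many_peaks_to_ignore==0:
--         return [wavelength_list]
--     result = []
--     # Generate all combinations of indices to remove
--     for indices in combinations(range(len(wavelength_list)), how_many_peaks_to_ignore):
--         # Create a new list excluding the elements at the selected indices
--         new_lst = [wavelength_list[i] for i in range(len(wavelength_list)) if i not in indices]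
--         result.append(new_lst)
--     return result
-- ===== SOURCE B (Python) =====
-- def let_go_of_some_peaks(wavelength_list, how_many_peaks_to_ignore):
--     '''
--     For n peaks to ignore, returns a list containing all new possible combinations of wavelenght list.
--     '''
--     def drop_some(lst, k):
--         # all sublists of lst with k elements removed, removed-index-lexicographic order
--         if k == 0:
--             return [lst]
--         if not lst:
--             return []
--         head, rest = lst[0], lst[1:]
--         return drop_some(rest, k - 1) + [[head] + sub for sub in drop_some(rest, k)]
--     return drop_some(wavelength_list, how_many_peaks_to_ignore)
-- ===== Notes on version B (the rewrite author's own statement) =====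
-- stated objective: alternative
-- what changed: Replaces itertools.combinations over index tuples plus a per-combination rebuild-by-filter pass with a direct include/exclude recursion on the list that constructs each sublist once.
import Mathlib
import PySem

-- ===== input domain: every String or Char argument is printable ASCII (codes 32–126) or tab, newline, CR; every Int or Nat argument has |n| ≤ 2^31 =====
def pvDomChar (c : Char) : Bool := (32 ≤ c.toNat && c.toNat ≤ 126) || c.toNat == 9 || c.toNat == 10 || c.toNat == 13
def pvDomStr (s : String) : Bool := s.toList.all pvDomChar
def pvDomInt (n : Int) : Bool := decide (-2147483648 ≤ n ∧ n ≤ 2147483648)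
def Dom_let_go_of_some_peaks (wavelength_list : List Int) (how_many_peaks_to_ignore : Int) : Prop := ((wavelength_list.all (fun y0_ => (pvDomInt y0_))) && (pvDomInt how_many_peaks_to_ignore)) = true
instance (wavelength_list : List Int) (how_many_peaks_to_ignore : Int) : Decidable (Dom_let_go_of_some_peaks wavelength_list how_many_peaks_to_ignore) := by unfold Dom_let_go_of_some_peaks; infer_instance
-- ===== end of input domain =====

-- B replaces the combinations-of-indices enumeration with a direct include/exclude
-- recursion on the list (alternative decomposition, same cost).


-- ===== PORT A =====
-- itertools.combinations(pool, r): all r-subsequences of pool in lexicographic order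
def pyCombinations {α : Type} (pool : List α) (r : Nat) : List (List α) :=
  match r, pool with
  | 0, _ => [[]]
  | _ + 1, [] => []
  | r + 1, x :: xs => (pyCombinations xs r).map (fun c => x :: c) ++ pyCombinations xs (r + 1)

def let_go_of_some_peaks (wavelength_list : List Int) (how_many_peaks_to_ignore : Int) : List (List Int) :=
  if how_many_peaks_to_ignore = 0 then [wavelength_list]
  else
    -- combinations raises ValueError for negative r: Pre_ excludes that, so .toNat is exact here
    (pyCombinations (PySem.List.pyRange 0 wavelength_list.length 1) how_many_peaks_to_ignore.toNat).foldl
      (fun result indices =>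
        result ++ [(PySem.List.pyRange 0 wavelength_list.length 1).filter
            (fun i => !(indices.contains i)) |>.filterMap
            (fun i => PySem.List.pyGet? wavelength_list i)])
      []

-- ===== PORT B =====
def dropSome (lst : List Int) (k : Int) : List (List Int) :=
  if k = 0 then [lst]
  else
    match lst with
    | [] => []
    | head :: rest => dropSome rest (k - 1) ++ (dropSome rest k).map (fun sub => head :: sub)

def let_go_of_some_peaks_alt (wavelength_list : List Int) (how_many_peaks_to_ignore : Int) : List (List Int) :=
  dropSome wavelength_list how_many_peaks_to_ignore

-- ===== PRECONDITION & SPEC =====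
-- Pre_ excludes negative how_many_peaks_to_ignore, the only inputs where A raises
-- (ValueError from combinations() with negative r); A returns on everything else.
def Pre_let_go_of_some_peaks (wavelength_list : List Int) (how_many_peaks_to_ignore : Int) : Prop :=
  0 ≤ how_many_peaks_to_ignore
instance (wavelength_list : List Int) (how_many_peaks_to_ignore : Int) : Decidable (Pre_let_go_of_some_peaks wavelength_list how_many_peaks_to_ignore) := by unfold Pre_let_go_of_some_peaks; infer_instance
def pvWitness_let_go_of_some_peaks : List Int × Int := ([300, 450, 589, 633], 2)

def Spec_let_go_of_some_peaks (wavelength_list : List Int) (how_many_peaks_to_ignore : Int) (out : List (List Int)) : Prop := out = let_go_of_some_peaks_alt wavelength_list how_many_peaks_to_ignore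
instance (wavelength_list : List Int) (how_many_peaks_to_ignore : Int) (out : List (List Int)) : Decidable (Spec_let_go_of_some_peaks wavelength_list how_many_peaks_to_ignore out) := by unfold Spec_let_go_of_some_peaks; infer_instance

-- ===== CLAIM (what is proved, stated in full; the proofs are below) =====
def Claim_equal_let_go_of_some_peaks : Prop := ∀ (wavelength_list : List Int) (how_many_peaks_to_ignore : Int), Dom_let_go_of_some_peaks wavelength_list how_many_peaks_to_ignore → Pre_let_go_of_some_peaks wavelength_list how_many_peaks_to_ignore → Spec_let_go_of_some_peaks wavelength_list how_many_peaks_to_ignore (let_go_of_some_peaks wavelength_list how_many_peaks_to_ignore)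

-- ===== LEMMAS AND PROOFS =====

-- Nat-index version of B's recursion
def dropSomeN (lst : List Int) (k : Nat) : List (List Int) :=
  match k, lst with
  | 0, _ => [lst]
  | _ + 1, [] => []
  | k + 1, head :: rest => dropSomeN rest k ++ (dropSomeN rest (k + 1)).map (fun sub => head :: sub)

lemma dropSome_eq_dropSomeN (lst : List Int) (k : Int) (hk : 0 ≤ k) :
    dropSome lst k = dropSomeN lst k.toNat := by
  induction lst generalizing k with
  | nil =>
    rw [dropSome]
    by_cases h : k = 0
    · simp [h, dropSomeN]
    · have h1 : k.toNat = (k.toNat - 1) + 1 := by omega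
      rw [if_neg h, h1]
      rfl
  | cons x xs ih =>
    rw [dropSome]
    by_cases h : k = 0
    · simp [h, dropSomeN]
    · have h1 : k.toNat = (k.toNat - 1) + 1 := by omega
      rw [h1, dropSomeN, ih _ (by omega : 0 ≤ k - 1), ih _ hk]
      have h2 : (k - 1).toNat = k.toNat - 1 := by omega
      rw [if_neg h, h2, ← h1]

-- A's per-combination rebuild, over Nat indices
def selN (l : List Int) (c : List Nat) : List Int :=
  ((List.range l.length).filter (fun j => !(c.contains j))).filterMap (fun j => l[j]?)

lemma pyCombinations_map {α β : Type} (f : α → β) (pool : List α) (r : Nat) :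
    pyCombinations (pool.map f) r = (pyCombinations pool r).map (List.map f) := by
  induction pool generalizing r with
  | nil => cases r <;> simp [pyCombinations]
  | cons x xs ih =>
    cases r with
    | zero => simp [pyCombinations]
    | succ r => simp [pyCombinations, ih, List.map_map, Function.comp]

-- shared shape of one cons-step of selN
lemma filterMap_filter_succ (x : Int) (xs : List Int) (p : Nat → Bool) :
    List.filterMap (fun j => (x :: xs)[j]?)
        (List.filter p (List.map Nat.succ (List.range xs.length)))
      = List.filterMap (fun j => xs[j]?)
          (List.filter (fun j => p (j + 1)) (List.range xs.length)) := by
  rw [List.filter_map, List.filterMap_map]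
  rfl

lemma selN_nil (l : List Int) : selN l [] = l := by
  unfold selN
  simp only [List.contains_nil, Bool.not_false, List.filter_true]
  induction l with
  | nil => simp
  | cons x xs ih =>
    rw [List.length_cons, List.range_succ_eq_map, List.filterMap_cons, List.filterMap_map]
    simpa using ih

lemma selN_cons_zero (x : Int) (xs : List Int) (d : List Nat) :
    selN (x :: xs) (0 :: d.map Nat.succ) = selN xs d := by
  unfold selN
  rw [List.length_cons, List.range_succ_eq_map, List.filter_cons]
  rw [if_neg (by simp)]
  rw [filterMap_filter_succ]
  congr 1
  apply List.filter_congr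
  intro j _
  simp [List.contains_eq_mem]

lemma selN_cons_succ (x : Int) (xs : List Int) (d : List Nat) :
    selN (x :: xs) (d.map Nat.succ) = x :: selN xs d := by
  unfold selN
  rw [List.length_cons, List.range_succ_eq_map, List.filter_cons]
  rw [if_pos (by simp [List.contains_eq_mem])]
  rw [List.filterMap_cons]
  show x :: _ = _
  rw [filterMap_filter_succ]
  congr 2
  apply List.filter_congr
  intro j _
  simp [List.contains_eq_mem]

lemma core (l : List Int) (k : Nat) :
    (pyCombinations (List.range l.length) k).map (selN l) = dropSomeN l k := by
  induction l generalizing k with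
  | nil =>
    cases k with
    | zero => simp [pyCombinations, dropSomeN, selN]
    | succ k => simp [pyCombinations, dropSomeN]
  | cons x xs ih =>
    cases k with
    | zero => simp [pyCombinations, dropSomeN, selN_nil]
    | succ k =>
      rw [List.length_cons, List.range_succ_eq_map]
      rw [pyCombinations, dropSomeN]
      rw [List.map_append]
      congr 1
      · rw [pyCombinations_map, List.map_map, List.map_map, ← ih k]
        apply List.map_congr_left
        intro d _
        simpa [Function.comp] using selN_cons_zero x xs d
      · rw [pyCombinations_map, List.map_map, ← ih (k + 1), List.map_map]
        apply List.map_congr_left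
        intro d _
        simpa [Function.comp] using selN_cons_succ x xs d

-- bridge from the Int-index form A's port uses to selN
lemma sel_int_eq_selN (l : List Int) (c : List Nat) :
    ((PySem.List.pyRange 0 l.length 1).filter
        (fun i => !((c.map Int.ofNat).contains i)) |>.filterMap
        (fun i => PySem.List.pyGet? l i)) = selN l c := by
  rw [PySem.List.pyRange_one]
  simp only [Int.sub_zero, Int.toNat_natCast, List.filter_map, List.filterMap_map]
  unfold selN
  have hp : ∀ j ∈ List.range l.length,
      ((fun i => !((c.map Int.ofNat).contains i)) ∘ fun k : Nat => (0 : Int) + k) j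
        = (fun j => !(c.contains j)) j := by
    intro j _
    simp [Function.comp, List.contains_eq_mem]
  rw [List.filter_congr hp]
  have hf : ((fun i => PySem.List.pyGet? l i) ∘ fun k : Nat => (0 : Int) + k)
      = fun j : Nat => l[j]? := by
    funext j
    simp [Function.comp, PySem.List.pyGet?_natCast]
  rw [hf]

theorem let_go_of_some_peaks_eq (l : List Int) (k : Int) (hk : 0 ≤ k) :
    let_go_of_some_peaks l k = let_go_of_some_peaks_alt l k := by
  unfold let_go_of_some_peaks let_go_of_some_peaks_alt
  by_cases h : k = 0
  · rw [if_pos h, h, dropSome.eq_def]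
    simp
  · rw [if_neg h, PySem.List.foldl_append_singleton_eq_map, List.nil_append]
    rw [dropSome_eq_dropSomeN l k hk, ← core l k.toNat]
    have hrange : PySem.List.pyRange 0 (l.length : Int) 1 = (List.range l.length).map Int.ofNat := by
      rw [PySem.List.pyRange_one]
      simp
    rw [hrange, pyCombinations_map, List.map_map]
    apply List.map_congr_left
    intro c _
    simpa [Function.comp, hrange] using sel_int_eq_selN l c

-- ===== VERDICT (by name: the statement is the Claim_ definition above) =====
theorem let_go_of_some_peaks_spec : Claim_equal_let_go_of_some_peaks := by
  intro l k _ hk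
  unfold Spec_let_go_of_some_peaks
  exact let_go_of_some_peaks_eq l k hk
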